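-- pv_equiv track=rewrite | github.com/timothyjamesbecker/somacx | somacx/variant_utils.py | seq_name_map
-- ===== SOURCE A (Python) =====
-- def seq_name_map(chroms):
--     gc_set,gc  = set([str(s) for s in range(23)]+['X','Y']),0
--     hg_set,hg  = set(['chr'+str(s) for s in list(gc_set)]),0
--     for chrom in chroms:
--         if chrom.upper().startswith('CHR'): hg += 1
--         else:                               gc += 1
--     C,D = {},{}
--     if hg>=gc: #have hg take off the chr
--         for chrom in chroms:
--             k = chrom.upper().split('CHR')[1].split('_')[0]
--             if chrom in hg_set:
--                 if k in C: C[k] += [chrom]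
--                 else:      C[k]  = [chrom]
--     else: #have 1 add the chr
--         for chrom in chroms:
--             k = 'chr'+chrom
--             if chrom in gc_set:
--                 if k in C: C[k] += [chrom]
--                 else:      C[k]  = [chrom]
--     for k in C:
--         for i in range(len(C[k])):
--             D[C[k][i]] = k
--     return D
-- ===== SOURCE B (Python) =====
-- def seq_name_map(chroms):
--     names = [str(s) for s in range(23)] + ['X', 'Y']
--     hg_map = {'chr' + s: s for s in names}
--     hg = sum(1 for c in chroms if c.upper().startswith('CHR'))
--     if 2 * hg >= len(chroms):
--         return {c: hg_map[c] for c in chroms if c in hg_map}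
--     else:
--         name_set = set(names)
--         return {c: 'chr' + c for c in chroms if c in name_set}
-- ===== Notes on version B (the rewrite author's own statement) =====
-- stated objective: simpler
-- what changed: B replaces A's three passes (count, group chroms into a dict-of-lists keyed by normalized name, then invert that dict index-by-index) with one count plus a single direct dict-comprehension pass that maps each recognized chrom straight to its normalized name via a precomputed chr-prefix table, dropping the intermediate grouping structure entirely.
import Mathlib
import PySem

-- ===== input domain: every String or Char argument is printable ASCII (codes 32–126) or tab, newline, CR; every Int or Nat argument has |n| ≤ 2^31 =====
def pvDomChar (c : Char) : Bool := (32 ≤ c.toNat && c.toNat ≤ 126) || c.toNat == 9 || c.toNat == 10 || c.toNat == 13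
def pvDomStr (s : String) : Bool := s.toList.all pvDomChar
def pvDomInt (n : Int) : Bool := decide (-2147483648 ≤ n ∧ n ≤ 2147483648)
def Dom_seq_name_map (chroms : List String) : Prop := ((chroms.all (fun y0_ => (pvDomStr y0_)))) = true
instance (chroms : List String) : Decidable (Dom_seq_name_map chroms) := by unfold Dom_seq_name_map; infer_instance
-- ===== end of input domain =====

-- B replaces A's group-into-dict-of-lists-then-invert passes by one direct pass over a
-- precomputed chr-prefix table; equal output order, no asymptotic change (objective: simpler).

-- ===== PORT A =====
-- k = chrom.upper().split('CHR')[1].split('_')[0]; the pyGet? 1 is none exactly where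
-- Python raises IndexError (excluded by Pre_), the getD "" there is never reached under Pre_.
def pvKA (chrom : String) : String :=
  let t := (PySem.List.pyGet? ((PySem.Str.split? (PySem.Str.upper chrom) "CHR").getD []) 1).getD ""
  (PySem.List.pyGet? ((PySem.Str.split? t "_").getD []) 0).getD ""

-- the final D-building double loop: for k in C: for i in range(len(C[k])): D[C[k][i]] = k
def pvInvert (C : PySem.Dict String (List String)) : PySem.Dict String String :=
  C.items.foldl (fun D p =>
    (PySem.List.pyRange 0 (p.2.length : Int) 1).foldl
      (fun D i => D.insert ((PySem.List.pyGet? p.2 i).getD "") p.1) D) PySem.Dict.empty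

def seq_name_map (chroms : List String) : List (String × String) :=
  let gcSet : PySem.Set String :=
    PySem.Set.ofList ((PySem.List.pyRange 0 23 1).map PySem.Int.toStr ++ ["X", "Y"])
  let hgSet : PySem.Set String := PySem.Set.ofList (gcSet.map (fun s => "chr" ++ s))
  let counts : Int × Int := chroms.foldl (fun hg_gc chrom =>
      if PySem.Str.startswith (PySem.Str.upper chrom) "CHR" then (hg_gc.1 + 1, hg_gc.2)
      else (hg_gc.1, hg_gc.2 + 1)) (0, 0)
  let C : PySem.Dict String (List String) :=
    if counts.1 ≥ counts.2 then
      chroms.foldl (fun C chrom =>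
        let k := pvKA chrom
        if PySem.Set.contains hgSet chrom then
          if C.contains k then C.insert k (C.getD k [] ++ [chrom]) else C.insert k [chrom]
        else C) PySem.Dict.empty
    else
      chroms.foldl (fun C chrom =>
        let k := "chr" ++ chrom
        if PySem.Set.contains gcSet chrom then
          if C.contains k then C.insert k (C.getD k [] ++ [chrom]) else C.insert k [chrom]
        else C) PySem.Dict.empty
  (pvInvert C).items

-- ===== PORT B =====
def seq_name_map_alt (chroms : List String) : List (String × String) :=
  let names : List String := (PySem.List.pyRange 0 23 1).map PySem.Int.toStr ++ ["X", "Y"]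
  let hgMap : PySem.Dict String String := PySem.Dict.ofList (names.map (fun s => ("chr" ++ s, s)))
  let hg : Int := (chroms.map (fun c =>
      if PySem.Str.startswith (PySem.Str.upper c) "CHR" then (1 : Int) else 0)).sum
  if 2 * hg ≥ (chroms.length : Int) then
    (chroms.foldl (fun D c =>
      if hgMap.contains c then D.insert c (hgMap.getD c "") else D) PySem.Dict.empty).items
  else
    let nameSet : PySem.Set String := PySem.Set.ofList names
    (chroms.foldl (fun D c =>
      if PySem.Set.contains nameSet c then D.insert c ("chr" ++ c) else D) PySem.Dict.empty).items

-- ===== PRECONDITION & SPEC =====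
-- Pre_ excludes exactly the inputs on which Python A raises IndexError: those where the
-- 'chr'-majority branch is taken yet some chrom has no 'CHR' inside its uppercase form.
def Pre_seq_name_map (chroms : List String) : Prop :=
  2 * (chroms.countP (fun c => PySem.Str.startswith (PySem.Str.upper c) "CHR") : Int)
      ≥ (chroms.length : Int) →
  ∀ c ∈ chroms, PySem.Str.isIn "CHR" (PySem.Str.upper c) = true
instance (chroms : List String) : Decidable (Pre_seq_name_map chroms) := by
  unfold Pre_seq_name_map; infer_instance
def pvWitness_seq_name_map : List String := (["chr1", "chrX", "chr1"])

def Spec_seq_name_map (chroms : List String) (out : List (String × String)) : Prop := out = seq_name_map_alt chroms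
instance (chroms : List String) (out : List (String × String)) : Decidable (Spec_seq_name_map chroms out) := by unfold Spec_seq_name_map; infer_instance

-- ===== CLAIM (what is proved, stated in full; the proofs are below) =====
def Claim_equal_seq_name_map : Prop := ∀ (chroms : List String), Dom_seq_name_map chroms → Pre_seq_name_map chroms → Spec_seq_name_map chroms (seq_name_map chroms)

-- ===== LEMMAS AND PROOFS =====

-- the 25 recognized hg-style names, as a literal
def pvHgLit : List String :=
  ["chr0", "chr1", "chr2", "chr3", "chr4", "chr5", "chr6", "chr7", "chr8", "chr9", "chr10",
   "chr11", "chr12", "chr13", "chr14", "chr15", "chr16", "chr17", "chr18", "chr19", "chr20",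
   "chr21", "chr22", "chrX", "chrY"]

-- invariant of A's grouping dict C: keys are distinct, every group is nonempty and holds
-- only members of S whose key (under keyA) is the group's key
def pvInv (S : PySem.Set String) (keyA : String → String)
    (C : PySem.Dict String (List String)) : Prop :=
  C.keys.Nodup ∧ ∀ p ∈ C.items, p.2 ≠ [] ∧ ∀ x ∈ p.2, PySem.Set.contains S x = true ∧ keyA x = p.1

theorem pv_counts (chroms : List String) (a b : Int) :
    chroms.foldl (fun hg_gc chrom =>
      if PySem.Str.startswith (PySem.Str.upper chrom) "CHR" then (hg_gc.1 + 1, hg_gc.2)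
      else (hg_gc.1, hg_gc.2 + 1)) (a, b)
    = (a + (chroms.countP (fun c => PySem.Str.startswith (PySem.Str.upper c) "CHR") : Int),
       b + ((chroms.length : Int)
            - (chroms.countP (fun c => PySem.Str.startswith (PySem.Str.upper c) "CHR") : Int))) := by
  induction chroms generalizing a b with
  | nil => simp
  | cons c t ih =>
    simp only [List.foldl_cons, List.countP_cons, List.length_cons]
    by_cases h : PySem.Str.startswith (PySem.Str.upper c) "CHR" = true
    · rw [if_pos h, ih]
      simp only [h, if_pos]
      refine Prod.ext ?_ ?_ <;> simp <;> push_cast <;> ring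
    · rw [if_neg h, ih]
      simp only [h, if_neg, Bool.false_eq_true, not_false_iff]
      refine Prod.ext ?_ ?_ <;> simp [h] <;> push_cast <;> ring

theorem pv_head_mem {l : List String} (h : l ≠ []) : l.headD "" ∈ l := by
  obtain ⟨x, t, rfl⟩ := List.exists_cons_of_ne_nil h
  simp

theorem pv_headD_append {l : List String} (c : String) (h : l ≠ []) :
    (l ++ [c]).headD "" = l.headD "" := by
  obtain ⟨x, t, rfl⟩ := List.exists_cons_of_ne_nil h
  simp

theorem pv_fold_const_insert (r : List Int) (c k : String) (D : PySem.Dict String String) :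
    r.foldl (fun (D : PySem.Dict String String) _ => D.insert c k) (D.insert c k) = D.insert c k := by
  induction r generalizing D with
  | nil => rfl
  | cons i r ih => simpa [PySem.Dict.insert_insert_self] using ih D

-- A's inner inversion loop over a constant nonempty group inserts its element once
theorem pv_inner_loop (l : List String) (c k : String) (D : PySem.Dict String String)
    (hne : l ≠ []) (hall : ∀ x ∈ l, x = c) :
    (PySem.List.pyRange 0 (l.length : Int) 1).foldl
      (fun D i => D.insert ((PySem.List.pyGet? l i).getD "") k) D = D.insert c k := by
  rw [PySem.List.foldl_congr_mem _ _ (fun (D : PySem.Dict String String) _ => D.insert c k) _ ?_]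
  · obtain ⟨x, t, rfl⟩ := List.exists_cons_of_ne_nil hne
    have h01 : (0 : Int) < ((x :: t).length : Int) := by
      have : (0 : Int) < ((t.length + 1 : Nat) : Int) := by positivity
      simpa using this
    rw [PySem.List.pyRange_one_cons h01]
    exact pv_fold_const_insert _ c k D
  · intro D' i hi
    have hb := (PySem.List.mem_pyRange_one).mp hi
    have : (PySem.List.pyGet? l i).getD "" = PySem.List.pyGetD l i "" := rfl
    rw [this, PySem.List.pyGetD_eq_getElem _ _ hb.1 hb.2]
    rw [hall _ (l.getElem_mem _)]

theorem pv_insert_mem_self (d : PySem.Dict String String) (c k : String)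
    (hnd : d.keys.Nodup) (hmem : (c, k) ∈ d.items) : d.insert c k = d := by
  have hget : d.get? c = some k := ((PySem.Dict.get?_eq_some_iff_mem_items d c k hnd).mpr hmem)
  have hc : d.contains c = true :=
    (PySem.Dict.contains_iff_mem_keys d c).mpr (PySem.Dict.mem_keys_of_mem_items d hmem)
  apply PySem.Dict.ext
  rw [PySem.Dict.items_insert_of_contains d k hc]
  rw [List.map_congr_left (g := id) ?_, List.map_id]
  intro p hp
  by_cases h : p.1 = c
  · have : d.get? p.1 = some p.2 := (PySem.Dict.get?_eq_some_iff_mem_items d p.1 p.2 hnd).mpr ?_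
    · simp only [h, beq_self_eq_true, if_pos, id]
      rw [h] at this
      rw [hget] at this
      obtain ⟨p1, p2⟩ := p
      simp_all
    · simpa using hp
  · simp [h]

theorem pv_heads_nodup (S : PySem.Set String) (keyA : String → String)
    (C : PySem.Dict String (List String)) (hInv : pvInv S keyA C) :
    (C.items.map (fun p => p.2.headD "")).Nodup := by
  obtain ⟨hnd, hgrp⟩ := hInv
  apply List.Nodup.map_on ?_ (List.Nodup.of_map _ hnd)
  intro p hp q hq heq
  have hp2 := hgrp p hp
  have hq2 := hgrp q hq
  have hph := hp2.2 _ (pv_head_mem hp2.1)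
  have hqh := hq2.2 _ (pv_head_mem hq2.1)
  have h1 : p.1 = q.1 := by rw [← hph.2, ← hqh.2, heq]
  exact List.inj_on_of_nodup_map hnd hp hq h1

-- A's inversion of a constant-group dict, in closed form
theorem pv_invert_explicit (S : PySem.Set String) (keyA : String → String)
    (hinj : ∀ x y, PySem.Set.contains S x = true → PySem.Set.contains S y = true →
      keyA x = keyA y → x = y)
    (C : PySem.Dict String (List String)) (hInv : pvInv S keyA C) :
    pvInvert C = PySem.Dict.mk (C.items.map (fun p => (p.2.headD "", p.1))) := by
  obtain ⟨hnd, hgrp⟩ := hInv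
  unfold pvInvert
  rw [PySem.List.foldl_congr_mem _ _
      (fun (D : PySem.Dict String String) p => D.insert (p.2.headD "") p.1) _ ?_]
  · apply PySem.Dict.ext
    rw [PySem.Dict.items_foldl_insert_fresh C.items (fun p => p.2.headD "") (fun p => p.1)
        PySem.Dict.empty (fun a _ => rfl) ?_]
    · rfl
    · exact pv_heads_nodup S keyA C ⟨hnd, hgrp⟩
  · intro D p hp
    have hp2 := hgrp p hp
    apply pv_inner_loop _ _ _ _ hp2.1
    intro x hx
    have hxh := hp2.2 _ hx
    have hph := hp2.2 _ (pv_head_mem hp2.1)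
    exact hinj _ _ hxh.1 hph.1 (by rw [hxh.2, hph.2])

theorem pv_inv_step (S : PySem.Set String) (keyA : String → String)
    (C : PySem.Dict String (List String)) (hInv : pvInv S keyA C) (c : String)
    (hc : PySem.Set.contains S c = true) :
    pvInv S keyA (if C.contains (keyA c) then
        C.insert (keyA c) (C.getD (keyA c) [] ++ [c]) else C.insert (keyA c) [c]) := by
  obtain ⟨hnd, hgrp⟩ := hInv
  by_cases h : C.contains (keyA c) = true
  · rw [if_pos h]
    constructor
    · rw [PySem.Dict.keys_insert_of_contains _ _ h]; exact hnd
    · intro p hp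
      rw [PySem.Dict.items_insert_of_contains _ _ h] at hp
      obtain ⟨q, hq, hqe⟩ := List.mem_map.mp hp
      by_cases hqk : (q.1 == keyA c) = true
      · rw [if_pos hqk] at hqe
        have hq1 : q.1 = keyA c := by simpa using hqk
        have hgd : C.getD (keyA c) [] = q.2 := by
          rw [← hq1]
          exact PySem.Dict.getD_of_mem_items C (by simpa using hq) hnd []
        subst hqe
        constructor
        · simp
        · intro x hx
          simp only [hgd, List.mem_append, List.mem_singleton] at hx
          rcases hx with hx | hx
          · have := (hgrp q hq).2 x hx
            exact ⟨this.1, by rw [this.2, hq1]⟩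
          · subst hx; exact ⟨hc, rfl⟩
      · rw [if_neg hqk] at hqe
        subst hqe
        exact hgrp q hq
  · rw [if_neg h]
    have hfalse : C.contains (keyA c) = false := by simpa using h
    constructor
    · rw [PySem.Dict.keys_insert_of_not_contains _ _ hfalse]
      refine List.Nodup.append hnd (by simp) ?_
      intro a ha hb
      simp at hb
      subst hb
      exact h ((PySem.Dict.contains_iff_mem_keys C (keyA c)).mpr ha)
    · intro p hp
      rw [PySem.Dict.items_insert_of_not_contains _ _ hfalse] at hp
      rcases List.mem_append.mp hp with hp | hp
      · exact hgrp p hp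
      · simp at hp
        subst hp
        exact ⟨by simp, by intro x hx; simp at hx; subst hx; exact ⟨hc, rfl⟩⟩

-- one grouping step followed by inversion equals one direct insertion
theorem pv_invert_step (S : PySem.Set String) (keyA : String → String)
    (hinj : ∀ x y, PySem.Set.contains S x = true → PySem.Set.contains S y = true →
      keyA x = keyA y → x = y)
    (C : PySem.Dict String (List String)) (hInv : pvInv S keyA C) (c : String)
    (hc : PySem.Set.contains S c = true) :
    pvInvert (if C.contains (keyA c) then
        C.insert (keyA c) (C.getD (keyA c) [] ++ [c]) else C.insert (keyA c) [c])
    = (pvInvert C).insert c (keyA c) := by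
  have hInv' := pv_inv_step S keyA C hInv c hc
  have hexpC := pv_invert_explicit S keyA hinj C hInv
  have hndk : (PySem.Dict.mk (C.items.map (fun p => (p.2.headD "", p.1)))).keys.Nodup := by
    have : (PySem.Dict.mk (C.items.map (fun p => (p.2.headD "", p.1)))).keys
        = C.items.map (fun p => p.2.headD "") := by
      show (C.items.map (fun p => (p.2.headD "", p.1))).map (·.1) = _
      rw [List.map_map]
      rfl
    rw [this]
    exact pv_heads_nodup S keyA C hInv
  by_cases h : C.contains (keyA c) = true
  · rw [if_pos h] at hInv' ⊢
    rw [pv_invert_explicit S keyA hinj _ hInv', hexpC]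
    rw [PySem.Dict.items_insert_of_contains _ _ h]
    have hkmem : keyA c ∈ C.keys := (PySem.Dict.contains_iff_mem_keys C (keyA c)).mp h
    obtain ⟨q, hq, hq1⟩ := List.mem_map.mp hkmem
    have hq2 := hInv.2 q hq
    have hqhead : q.2.headD "" = c := by
      have hh := hq2.2 _ (pv_head_mem hq2.1)
      exact hinj _ _ hh.1 hc (by rw [hh.2, hq1])
    have hmapeq : (C.items.map (fun p => if (p.1 == keyA c) = true then
          (keyA c, C.getD (keyA c) [] ++ [c]) else p)).map (fun p => (p.2.headD "", p.1))
        = C.items.map (fun p => (p.2.headD "", p.1)) := by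
      rw [List.map_map]
      apply List.map_congr_left
      intro p hp
      by_cases hp1 : (p.1 == keyA c) = true
      · have hp1' : p.1 = keyA c := by simpa using hp1
        have hgd : C.getD (keyA c) [] = p.2 := by
          rw [← hp1']
          exact PySem.Dict.getD_of_mem_items C (by simpa using hp) hInv.1 []
        simp only [Function.comp, hp1, if_pos]
        rw [hgd, pv_headD_append c (hInv.2 p hp).1, hp1']
      · simp [Function.comp, hp1]
    rw [hmapeq]
    rw [pv_insert_mem_self _ c (keyA c) hndk ?_]
    show (c, keyA c) ∈ C.items.map (fun p => (p.2.headD "", p.1))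
    exact List.mem_map.mpr ⟨q, hq, by rw [hqhead, hq1]⟩
  · have hfalse : C.contains (keyA c) = false := by simpa using h
    rw [if_neg h] at hInv' ⊢
    rw [pv_invert_explicit S keyA hinj _ hInv', hexpC]
    rw [PySem.Dict.items_insert_of_not_contains _ _ hfalse]
    have hcont : (PySem.Dict.mk (C.items.map (fun p => (p.2.headD "", p.1)))).contains c = false := by
      by_contra hcc
      have hcc' : (PySem.Dict.mk (C.items.map (fun p => (p.2.headD "", p.1)))).contains c = true := by
        simpa using hcc
      have hmem := (PySem.Dict.contains_iff_mem_keys _ c).mp hcc'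
      have : c ∈ (C.items.map (fun p => (p.2.headD "", p.1))).map (·.1) := hmem
      rw [List.map_map] at this
      obtain ⟨p, hp, hpe⟩ := List.mem_map.mp this
      have hp2 := hInv.2 p hp
      have hh := hp2.2 _ (pv_head_mem hp2.1)
      have hkp : keyA c = p.1 := by
        rw [← hh.2]
        congr 1
        exact hpe.symm
      have : keyA c ∈ C.keys := hkp ▸ List.mem_map.mpr ⟨p, hp, rfl⟩
      rw [(PySem.Dict.contains_iff_mem_keys C (keyA c)).mpr this] at hfalse
      exact Bool.true_eq_false.mp hfalse
    apply PySem.Dict.ext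
    rw [PySem.Dict.items_insert_of_not_contains _ _ hcont]
    show (C.items ++ [(keyA c, [c])]).map (fun p => (p.2.headD "", p.1))
        = (C.items.map (fun p => (p.2.headD "", p.1))) ++ [(c, keyA c)]
    simp

-- A's whole grouping loop plus inversion equals B's direct loop
theorem pv_branch (S : PySem.Set String) (keyA : String → String)
    (guardB : String → Bool) (keyB : String → String)
    (hgb : ∀ c, guardB c = PySem.Set.contains S c)
    (hkb : ∀ c, PySem.Set.contains S c = true → keyB c = keyA c)
    (hinj : ∀ x y, PySem.Set.contains S x = true → PySem.Set.contains S y = true →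
      keyA x = keyA y → x = y)
    (l : List String) (C : PySem.Dict String (List String)) (hInv : pvInv S keyA C) :
    pvInvert (l.foldl (fun C chrom =>
        let k := keyA chrom
        if PySem.Set.contains S chrom then
          if C.contains k then C.insert k (C.getD k [] ++ [chrom]) else C.insert k [chrom]
        else C) C)
    = l.foldl (fun D c => if guardB c then D.insert c (keyB c) else D) (pvInvert C) := by
  induction l generalizing C with
  | nil => rfl
  | cons c t ih =>
    simp only [List.foldl_cons]
    by_cases hc : PySem.Set.contains S c = true
    · rw [if_pos hc, hgb c, if_pos hc, hkb c hc]
      rw [ih _ (pv_inv_step S keyA C hInv c hc)]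
      rw [pv_invert_step S keyA hinj C hInv c hc]
    · rw [if_neg hc, hgb c, if_neg hc]
      exact ih C hInv

-- concrete facts about the 25-name table
def pvHgT : PySem.Set String :=
  PySem.Set.ofList ((PySem.Set.ofList ((PySem.List.pyRange 0 23 1).map PySem.Int.toStr
    ++ ["X", "Y"])).map (fun s => "chr" ++ s))
def pvMapT : PySem.Dict String String :=
  PySem.Dict.ofList (((PySem.List.pyRange 0 23 1).map PySem.Int.toStr
    ++ ["X", "Y"]).map (fun s => ("chr" ++ s, s)))

theorem pv_hgT_lit : pvHgT = pvHgLit := by decide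
theorem pv_mapT_keys : pvMapT.keys = pvHgLit := by decide

theorem pv_hgb_hg (c : String) : pvMapT.contains c = PySem.Set.contains pvHgT c := by
  rw [PySem.Dict.contains_eq_decide_mem_keys, pv_mapT_keys, pv_hgT_lit]
  show _ = List.contains pvHgLit c
  by_cases hm : c ∈ pvHgLit
  · simp [hm, List.contains_iff_mem]
  · simp [hm, List.contains_iff_mem]

theorem pv_hkb_hg (c : String) (hc : PySem.Set.contains pvHgT c = true) :
    pvMapT.getD c "" = pvKA c := by
  rw [pv_hgT_lit] at hc
  have hm : c ∈ pvHgLit := List.contains_iff_mem.mp hc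
  have hall : ∀ x ∈ pvHgLit, pvMapT.getD x "" = pvKA x := by decide
  exact hall c hm

theorem pv_hinj_hg (x y : String) (hx : PySem.Set.contains pvHgT x = true)
    (hy : PySem.Set.contains pvHgT y = true) (h : pvKA x = pvKA y) : x = y := by
  rw [pv_hgT_lit] at hx hy
  have hnd : (pvHgLit.map pvKA).Nodup := by decide
  exact List.inj_on_of_nodup_map hnd (List.contains_iff_mem.mp hx) (List.contains_iff_mem.mp hy) h

theorem pv_inv_empty (S : PySem.Set String) (keyA : String → String) :
    pvInv S keyA PySem.Dict.empty := by
  constructor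
  · show List.Nodup []
    exact List.nodup_nil
  · intro p hp
    cases hp

def pvGcT : PySem.Set String :=
  PySem.Set.ofList ((PySem.List.pyRange 0 23 1).map PySem.Int.toStr ++ ["X", "Y"])

-- ===== VERDICT (by name: the statement is the Claim_ definition above) =====
theorem seq_name_map_spec : Claim_equal_seq_name_map := by
  intro chroms _ _
  unfold Spec_seq_name_map
  show seq_name_map chroms = seq_name_map_alt chroms
  simp only [seq_name_map, seq_name_map_alt]
  rw [pv_counts chroms 0 0, PySem.List.sum_map_ite_one_zero]
  set N : Int := (chroms.countP (fun c => PySem.Str.startswith (PySem.Str.upper c) "CHR") : Int)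
    with hN
  have hA : ((0 + N, 0 + ((chroms.length : Int) - N)).1 ≥ (0 + N, 0 + ((chroms.length : Int) - N)).2)
      ↔ 2 * N ≥ (chroms.length : Int) := by
    simp only [Prod.fst, Prod.snd]
    omega
  rw [if_congr hA rfl rfl]
  by_cases hcond : 2 * N ≥ (chroms.length : Int)
  · rw [if_pos hcond, if_pos hcond]
    exact congrArg PySem.Dict.items
      (pv_branch pvHgT pvKA (fun c => pvMapT.contains c) (fun c => pvMapT.getD c "")
        pv_hgb_hg pv_hkb_hg pv_hinj_hg chroms PySem.Dict.empty (pv_inv_empty _ _))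
  · rw [if_neg hcond, if_neg hcond]
    exact congrArg PySem.Dict.items
      (pv_branch pvGcT (fun chrom => "chr" ++ chrom) (fun c => PySem.Set.contains pvGcT c)
        (fun c => "chr" ++ c) (fun _ => rfl) (fun _ _ => rfl)
        (fun x y _ _ h => (String.append_right_inj "chr").mp h) chroms PySem.Dict.empty
        (pv_inv_empty _ _))
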